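-- pv_equiv track=rewrite | github.com/tp-duarte/alternative_economic_data | ml/model-creation.py | add_suffix_to_duplicates
-- ===== SOURCE A (Python) =====
-- def add_suffix_to_duplicates(lst):
--     frequency = {}
--     result = []
--     for item in lst:
--         if item in frequency:
--             frequency[item] += 1
--             item_with_suffix = item + "_dupplicated_" + str(frequency[item])
--             result.append(item_with_suffix)
--         else:
--             frequency[item] = 0
--             result.append(item)
--     return result
-- ===== SOURCE B (Python) =====
-- def add_suffix_to_duplicates(lst):
--     # Group the positions of each distinct item, then scatter the names back:
--     # the j-th occurrence of an item (j >= 1) gets the suffix "_dupplicated_j".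
--     groups = {}
--     for i, item in enumerate(lst):
--         groups.setdefault(item, []).append(i)
--     rename = {}
--     for item, idxs in groups.items():
--         for j, i in enumerate(idxs):
--             rename[i] = item if j == 0 else item + "_dupplicated_" + str(j)
--     return [rename[i] for i in range(len(lst))]
-- ===== Notes on version B (the rewrite author's own statement) =====
-- stated objective: alternative
-- what changed: Replaces A's single pass with a running per-item counter by a three-stage group-and-scatter: first collect the list of positions of every distinct item, then enumerate each position group to build a position->name table (j-th occurrence gets suffix j), and finally read the table out in index order.
import Mathlib
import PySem

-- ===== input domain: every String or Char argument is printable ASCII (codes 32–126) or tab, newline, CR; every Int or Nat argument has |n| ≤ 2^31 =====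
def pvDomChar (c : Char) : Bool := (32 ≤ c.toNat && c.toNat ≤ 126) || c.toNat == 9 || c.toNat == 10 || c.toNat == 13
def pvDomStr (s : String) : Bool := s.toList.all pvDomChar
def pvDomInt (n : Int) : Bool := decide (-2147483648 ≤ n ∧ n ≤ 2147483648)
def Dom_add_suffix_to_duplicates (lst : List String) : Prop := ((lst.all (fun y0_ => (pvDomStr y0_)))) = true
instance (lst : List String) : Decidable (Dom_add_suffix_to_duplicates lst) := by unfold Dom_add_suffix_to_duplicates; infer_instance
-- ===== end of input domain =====

-- B replaces A's single pass with a running per-item counter by a group-and-scatter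
-- scheme: collect the positions of each distinct item, enumerate each position group
-- to build a position -> name table, read the table out in index order (alternative).

-- ===== PORT A =====
-- A's loop body: mutable dict `frequency` and accumulator `result`.
def aStep (st : PySem.Dict String Int × List String) (item : String) :
    PySem.Dict String Int × List String :=
  let frequency := st.1
  let result := st.2
  if frequency.contains item then
    let n := frequency.getD item 0 + 1
    (frequency.insert item n, result ++ [item ++ "_dupplicated_" ++ PySem.Int.toStr n])
  else
    (frequency.insert item 0, result ++ [item])

def add_suffix_to_duplicates (lst : List String) : List String :=
  (lst.foldl aStep (PySem.Dict.empty, [])).2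

-- ===== PORT B =====
-- 'item if j == 0 else item + "_dupplicated_" + str(j)'
def bName (item : String) (j : Int) : String :=
  if j = 0 then item else item ++ "_dupplicated_" ++ PySem.Int.toStr j

-- 'for i, item in enumerate(lst): groups.setdefault(item, []).append(i)'
def bGroups (lst : List String) : PySem.Dict String (List Int) :=
  (PySem.List.enumerate lst 0).foldl
    (fun g p => g.modify p.2 [] (· ++ [p.1])) PySem.Dict.empty

-- 'for item, idxs in groups.items(): for j, i in enumerate(idxs): rename[i] = …'
def bRename (lst : List String) : PySem.Dict Int String :=
  (bGroups lst).items.foldl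
    (fun r q => (PySem.List.enumerate q.2 0).foldl
      (fun r p => r.insert p.2 (bName q.1 p.1)) r) PySem.Dict.empty

-- '[rename[i] for i in range(len(lst))]' — the key i is always present (every index
-- was grouped), so Python's rename[i] never raises; ported with getD.
def add_suffix_to_duplicates_alt (lst : List String) : List String :=
  (PySem.List.pyRange 0 (lst.length : Int) 1).map (fun i => (bRename lst).getD i "")

-- ===== PRECONDITION & SPEC =====
def Spec_add_suffix_to_duplicates (lst : List String) (out : List String) : Prop := out = add_suffix_to_duplicates_alt lst
instance (lst : List String) (out : List String) : Decidable (Spec_add_suffix_to_duplicates lst out) := by unfold Spec_add_suffix_to_duplicates; infer_instance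

-- ===== CLAIM (what is proved, stated in full; the proofs are below) =====
def Claim_equal_add_suffix_to_duplicates : Prop := ∀ (lst : List String), Dom_add_suffix_to_duplicates lst → Spec_add_suffix_to_duplicates lst (add_suffix_to_duplicates lst)

-- ===== LEMMAS AND PROOFS =====

-- the element both programs emit at a position whose earlier part of the list is `pre`
def bElem (pre : List String) (item : String) : String :=
  if pre.count item = 0 then item
  else item ++ "_dupplicated_" ++ PySem.Int.toStr ((pre.count item : Nat) : Int)

-- the common reference run: process `rest` after prefix `pre`
def bRun (pre rest : List String) : List String :=
  match rest with
  | [] => []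
  | x :: xs => bElem pre x :: bRun (pre ++ [x]) xs

-- the invariant A's dict satisfies after processing `pre`
def AInv (pre : List String) (freq : PySem.Dict String Int) : Prop :=
  ∀ item, freq.get? item =
    if pre.count item = 0 then none else some ((pre.count item : Int) - 1)

theorem aLoop_eq_bRun (rest : List String) :
    ∀ (pre : List String) (freq : PySem.Dict String Int) (acc : List String),
      AInv pre freq → (rest.foldl aStep (freq, acc)).2 = acc ++ bRun pre rest := by
  induction rest with
  | nil => intro pre freq acc _; simp [bRun]
  | cons x xs ih =>
    intro pre freq acc hInv
    have hx := hInv x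
    by_cases h0 : pre.count x = 0
    · have hnone : freq.get? x = none := by simp [hx, h0]
      have hcont : freq.contains x = false := by
        simp [PySem.Dict.contains_eq_isSome_get?, hnone]
      have hInv' : AInv (pre ++ [x]) (freq.insert x 0) := by
        intro item
        rw [PySem.Dict.get?_insert]
        by_cases hix : item = x
        · subst hix; simp [h0]
        · have : (pre ++ [x]).count item = pre.count item := by
            simp [List.count_append, Ne.symm hix]
          simp [hix, this, hInv item]
      simp only [List.foldl_cons, aStep, hcont, Bool.false_eq_true, if_false]
      rw [ih (pre ++ [x]) _ (acc ++ [x]) hInv']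
      simp [bRun, bElem, h0]
    · have hsome : freq.get? x = some ((pre.count x : Int) - 1) := by simp [hx, h0]
      have hcont : freq.contains x = true := by
        simp [PySem.Dict.contains_eq_isSome_get?, hsome]
      have hgetD : freq.getD x 0 = (pre.count x : Int) - 1 := by
        rw [PySem.Dict.getD_eq_get?_getD, hsome]; rfl
      have hn : freq.getD x 0 + 1 = (pre.count x : Int) := by rw [hgetD]; ring
      have hInv' : AInv (pre ++ [x]) (freq.insert x ((pre.count x : Int))) := by
        intro item
        rw [PySem.Dict.get?_insert]
        by_cases hix : item = x
        · rw [if_pos hix, hix]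
          have hc : (pre ++ [x]).count x = pre.count x + 1 := by
            simp [List.count_append]
          simp [hc]
        · have : (pre ++ [x]).count item = pre.count item := by
            simp [List.count_append, Ne.symm hix]
          simp [hix, this, hInv item]
      simp only [List.foldl_cons, aStep, hcont, if_true]
      rw [hn, ih (pre ++ [x]) _ _ hInv']
      simp [bRun, bElem, h0]

theorem length_bRun (rest : List String) : ∀ pre, (bRun pre rest).length = rest.length := by
  induction rest with
  | nil => intro pre; simp [bRun]
  | cons x xs ih => intro pre; simp [bRun, ih]

theorem getElem_bRun (rest : List String) :
    ∀ (pre : List String) (j : Nat) (hj : j < rest.length),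
      (bRun pre rest)[j]'(by rw [length_bRun]; exact hj)
        = bElem (pre ++ rest.take j) (rest[j]'hj) := by
  induction rest with
  | nil => intro pre j hj; simp at hj
  | cons x xs ih =>
    intro pre j hj
    cases j with
    | zero => simp [bRun]
    | succ j' =>
      have hj' : j' < xs.length := by simpa using hj
      have := ih (pre ++ [x]) j' hj'
      simpa [bRun, List.append_assoc] using this

-- ===== B side =====

-- the positions of x in lst
def posL (lst : List String) (x : String) : List Int :=
  ((PySem.List.enumerate lst 0).filter (fun p => p.2 == x)).map (·.1)

theorem mem_posL (lst : List String) (x : String) (i : Int) :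
    i ∈ posL lst x ↔ ∃ (k : Nat) (hk : k < lst.length), i = (k : Int) ∧ lst[k] = x := by
  unfold posL
  simp only [List.mem_map, List.mem_filter, PySem.List.mem_enumerate_iff]
  constructor
  · rintro ⟨p, ⟨⟨k, hk, rfl⟩, hpx⟩, rfl⟩
    exact ⟨k, hk, by simp, by simpa using hpx⟩
  · rintro ⟨k, hk, rfl, hkx⟩
    exact ⟨((k : Int), lst[k]), ⟨⟨k, hk, by simp⟩, by simpa using hkx⟩, rfl⟩

theorem nodup_posL (lst : List String) (x : String) : (posL lst x).Nodup := by
  unfold posL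
  have h1 : ((PySem.List.enumerate lst 0).filter (fun p => p.2 == x)).Pairwise
      (fun p q => p.1 < q.1) :=
    List.Pairwise.filter _ (PySem.List.pairwise_lt_enumerate lst 0)
  have h2 : (((PySem.List.enumerate lst 0).filter (fun p => p.2 == x)).map (·.1)).Pairwise
      (· < ·) := by
    rw [List.pairwise_map]; exact h1
  exact h2.imp (fun h => ne_of_lt h)

theorem posL_append (lst : List String) (y : String) (x : String) :
    posL (lst ++ [y]) x = posL lst x ++ (if y = x then [(lst.length : Int)] else []) := by
  unfold posL
  rw [PySem.List.enumerate_append, List.filter_append, List.map_append]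
  congr 1
  by_cases h : y = x <;>
    simp [PySem.List.enumerate_cons, PySem.List.enumerate_nil, h]

theorem length_posL (lst : List String) (x : String) :
    (posL lst x).length = lst.count x := by
  induction lst using List.reverseRecOn with
  | nil => simp [posL, PySem.List.enumerate_nil]
  | append_singleton l y ih =>
    rw [posL_append]
    by_cases h : y = x <;> simp [h, ih, List.count_append]

theorem rank_posL (lst : List String) (i : Nat) (hi : i < lst.length) :
    ∃ hj : (lst.take i).count (lst[i]'hi) < (posL lst (lst[i]'hi)).length,
      (posL lst (lst[i]'hi))[(lst.take i).count (lst[i]'hi)]'hj = (i : Int) := by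
  induction lst using List.reverseRecOn with
  | nil => simp at hi
  | append_singleton l y ih =>
    by_cases hcase : i < l.length
    · have hx : (l ++ [y])[i]'hi = l[i]'hcase := by
        rw [List.getElem_append_left hcase]
      have htake : (l ++ [y]).take i = l.take i := by
        rw [List.take_append_of_le_length (le_of_lt hcase)]
      obtain ⟨hj, hval⟩ := ih hcase
      rw [hx, htake, posL_append]
      refine ⟨by rw [List.length_append]; omega, ?_⟩
      rw [List.getElem_append_left hj]
      exact hval
    · have hi' : i = l.length := by
        have := hi; simp at this; omega
      subst hi'
      have hx : (l ++ [y])[l.length]'hi = y := by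
        simp
      have htake : (l ++ [y]).take l.length = l := by
        simp
      rw [hx, htake, posL_append, if_pos rfl]
      have hcnt : l.count y = (posL l y).length := (length_posL l y).symm
      refine ⟨by simp [hcnt], ?_⟩
      simp only [hcnt]
      exact List.getElem_concat_length rfl _

-- a rename-group fold leaves untouched every position not in its index list
theorem rgroup_untouched (x : String) (idxs : List Int) (i : Int) (hni : i ∉ idxs) :
    ∀ (s : Int) (r : PySem.Dict Int String),
      ((PySem.List.enumerate idxs s).foldl
        (fun r p => r.insert p.2 (bName x p.1)) r).getD i "" = r.getD i "" := by
  induction idxs with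
  | nil => intro s r; simp [PySem.List.enumerate_nil]
  | cons a as ih =>
    intro s r
    have hia : i ≠ a := fun h => hni (h ▸ List.mem_cons_self)
    have hnas : i ∉ as := fun h => hni (List.mem_cons_of_mem _ h)
    rw [PySem.List.enumerate_cons, List.foldl_cons, ih hnas]
    rw [PySem.Dict.getD_insert, if_neg hia]

-- a rename-group fold writes bName x (s + j) at the j-th index of its group
theorem rgroup_hit (x : String) (idxs : List Int) (hnd : idxs.Nodup) (i : Int) :
    ∀ (j : Nat) (hj : j < idxs.length), idxs[j]'hj = i →
    ∀ (s : Int) (r : PySem.Dict Int String),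
      ((PySem.List.enumerate idxs s).foldl
        (fun r p => r.insert p.2 (bName x p.1)) r).getD i "" = bName x (s + (j : Int)) := by
  induction idxs with
  | nil => intro j hj; simp at hj
  | cons a as ih =>
    intro j hj hval s r
    rw [PySem.List.enumerate_cons, List.foldl_cons]
    cases j with
    | zero =>
      have hia : a = i := by simpa using hval
      have hnas : i ∉ as := by
        rw [← hia]; exact (List.nodup_cons.mp hnd).1
      rw [rgroup_untouched x as i hnas, PySem.Dict.getD_insert, if_pos hia.symm]
      simp
    | succ j' =>
      have hj' : j' < as.length := by simpa using hj
      have hval' : as[j']'hj' = i := by simpa using hval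
      rw [ih (List.nodup_cons.mp hnd).2 j' hj' hval' (s + 1)]
      congr 1
      push_cast
      ring

-- a fold over groups none of which contains i leaves getD i unchanged
theorem rgroups_untouched (ps : List (String × List Int)) (i : Int)
    (h : ∀ q ∈ ps, i ∉ q.2) :
    ∀ r : PySem.Dict Int String,
      (ps.foldl (fun r q => (PySem.List.enumerate q.2 0).foldl
        (fun r p => r.insert p.2 (bName q.1 p.1)) r) r).getD i "" = r.getD i "" := by
  induction ps with
  | nil => intro r; rfl
  | cons q qs ih =>
    intro r
    rw [List.foldl_cons, ih (fun q' hq' => h q' (List.mem_cons_of_mem _ hq'))]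
    exact rgroup_untouched q.1 q.2 i (h q List.mem_cons_self) 0 r

-- lookup through the whole group fold
theorem rgroups_lookup (lst : List String) (i : Nat) (hi : i < lst.length) :
    ∀ (ks : List String), ks.Nodup → (lst[i]'hi) ∈ ks →
    ∀ r : PySem.Dict Int String,
      ((ks.map (fun k => (k, posL lst k))).foldl
        (fun r q => (PySem.List.enumerate q.2 0).foldl
          (fun r p => r.insert p.2 (bName q.1 p.1)) r) r).getD (i : Int) ""
      = bName (lst[i]'hi) (((lst.take i).count (lst[i]'hi) : Nat) : Int) := by
  intro ks
  induction ks with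
  | nil => intro _ hmem; simp at hmem
  | cons k ks ih =>
    intro hnd hmem r
    rw [List.map_cons, List.foldl_cons]
    by_cases hk : k = lst[i]'hi
    · subst hk
      have hrest : ∀ q ∈ ks.map (fun k => (k, posL lst k)), (i : Int) ∉ q.2 := by
        rintro q hq
        obtain ⟨k', hk', rfl⟩ := List.mem_map.mp hq
        intro hmemq
        obtain ⟨m, hm, hmi, hmx⟩ := (mem_posL lst k' (i : Int)).mp hmemq
        have hmi' : i = m := by exact_mod_cast hmi
        subst hmi'
        exact (List.nodup_cons.mp hnd).1 (hmx ▸ hk')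
      rw [rgroups_untouched _ _ hrest]
      obtain ⟨hj, hval⟩ := rank_posL lst i hi
      have := rgroup_hit (lst[i]'hi) (posL lst (lst[i]'hi)) (nodup_posL lst _)
        (i : Int) _ hj hval 0 r
      rw [this]; norm_num
    · have hmem' : (lst[i]'hi) ∈ ks := by
        cases List.mem_cons.mp hmem with
        | inl h => exact absurd h.symm hk
        | inr h => exact h
      have hni : (i : Int) ∉ posL lst k := by
        intro hmemq
        obtain ⟨m, hm, hmi, hmx⟩ := (mem_posL lst k (i : Int)).mp hmemq
        have hmi' : i = m := by exact_mod_cast hmi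
        subst hmi'
        exact hk hmx.symm
      rw [ih (List.nodup_cons.mp hnd).2 hmem']

-- the groups dict: lookup and item list
theorem getD_bGroups (lst : List String) (x : String) :
    (bGroups lst).getD x [] = posL lst x := by
  unfold bGroups posL
  have : (PySem.List.enumerate lst 0).foldl
      (fun g p => g.modify p.2 [] (· ++ [p.1])) PySem.Dict.empty
      = ((PySem.List.enumerate lst 0).map (fun p => (p.2, p.1))).foldl
        (fun g p => g.modify p.1 [] (· ++ [p.2])) PySem.Dict.empty := by
    rw [List.foldl_map]
  rw [this, PySem.Dict.getD_foldl_modify_append]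
  rw [List.filter_map, List.map_map]
  simp [Function.comp_def]

theorem nodup_keys_bGroups (lst : List String) : (bGroups lst).keys.Nodup := by
  unfold bGroups
  exact PySem.Dict.nodup_keys_foldl_modify_key _ _ _ _ _ PySem.Dict.nodup_keys_empty

theorem keys_bGroups (lst : List String) :
    (bGroups lst).keys = PySem.Set.ofList lst := by
  unfold bGroups
  rw [PySem.Dict.keys_foldl_modify_key]
  rw [PySem.List.map_snd_enumerate]
  simp [PySem.Dict.keys_empty, PySem.Set.update_nil_left]

theorem items_bGroups (lst : List String) :
    (bGroups lst).items = (PySem.Set.ofList lst).map (fun x => (x, posL lst x)) := by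
  rw [PySem.Dict.items_eq_map_keys (bGroups lst) (nodup_keys_bGroups lst) []]
  rw [keys_bGroups]
  exact List.map_congr_left (fun x _ => by rw [getD_bGroups])

theorem getD_bRename (lst : List String) (i : Nat) (hi : i < lst.length) :
    (bRename lst).getD (i : Int) "" = bElem (lst.take i) (lst[i]'hi) := by
  unfold bRename
  rw [items_bGroups]
  have hmem : (lst[i]'hi) ∈ PySem.Set.ofList lst := by
    rw [PySem.Set.mem_ofList]; exact List.getElem_mem hi
  rw [rgroups_lookup lst i hi (PySem.Set.ofList lst) (PySem.Set.nodup_ofList lst) hmem]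
  unfold bName bElem
  by_cases h0 : (lst.take i).count (lst[i]'hi) = 0
  · simp [h0]
  · rw [if_neg (by exact_mod_cast h0), if_neg h0]

-- ===== VERDICT (by name: the statement is the Claim_ definition above) =====
theorem add_suffix_to_duplicates_spec : Claim_equal_add_suffix_to_duplicates := by
  intro lst _
  unfold Spec_add_suffix_to_duplicates add_suffix_to_duplicates add_suffix_to_duplicates_alt
  have hInv0 : AInv [] PySem.Dict.empty := by
    intro item; simp [PySem.Dict.get?_empty]
  rw [aLoop_eq_bRun lst [] PySem.Dict.empty [] hInv0, List.nil_append]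
  apply List.ext_getElem
  · rw [length_bRun]
    simp [PySem.List.length_pyRange_one]
  · intro j h1 h2
    have hj : j < lst.length := by rwa [length_bRun] at h1
    rw [getElem_bRun lst [] j hj, List.getElem_map]
    rw [PySem.List.getElem_pyRange_one]
    have : (0 : Int) + (j : Int) = (j : Int) := by ring
    rw [this, getD_bRename lst j hj]
    simp
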